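-- pv_equiv track=rewrite | github.com/gopalakrishnachennu/consulting | apps/resumes/services.py | _find_section_bounds
-- ===== SOURCE A (Python) =====
-- def _find_section_bounds(text, heading, headings):
--     start = text.find(heading)
--     if start == -1:
--         return None
--     # find next heading after start
--     after = text[start + len(heading):]
--     next_positions = []
--     for h in headings:
--         if h == heading:
--             continue
--         idx = after.find(h)
--         if idx != -1:
--             next_positions.append(idx)
--     end = start + len(heading) + (min(next_positions) if next_positions else len(after))
--     return start, end
-- ===== SOURCE B (Python) =====
-- def _find_section_bounds(text, heading, headings):
--     start = text.find(heading)
--     if start == -1: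
--         return None
--     after = text[start + len(heading):]
--     others = [h for h in headings if h != heading]
--     # single left-to-right scan: stop at the first position where any other heading starts
--     off = 0
--     rest = after
--     while rest and not any(rest.startswith(h) for h in others):
--         off += 1
--         rest = rest[1:]
--     return start, start + len(heading) + off
-- ===== Notes on version B (the rewrite author's own statement) =====
-- stated objective: alternative
-- what changed: Instead of calling find once per other heading and taking the min of the hit positions, B makes a single left-to-right scan over the text after the heading and stops at the first position where any other heading starts (early exit instead of k full substring searches).
import Mathlib
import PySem

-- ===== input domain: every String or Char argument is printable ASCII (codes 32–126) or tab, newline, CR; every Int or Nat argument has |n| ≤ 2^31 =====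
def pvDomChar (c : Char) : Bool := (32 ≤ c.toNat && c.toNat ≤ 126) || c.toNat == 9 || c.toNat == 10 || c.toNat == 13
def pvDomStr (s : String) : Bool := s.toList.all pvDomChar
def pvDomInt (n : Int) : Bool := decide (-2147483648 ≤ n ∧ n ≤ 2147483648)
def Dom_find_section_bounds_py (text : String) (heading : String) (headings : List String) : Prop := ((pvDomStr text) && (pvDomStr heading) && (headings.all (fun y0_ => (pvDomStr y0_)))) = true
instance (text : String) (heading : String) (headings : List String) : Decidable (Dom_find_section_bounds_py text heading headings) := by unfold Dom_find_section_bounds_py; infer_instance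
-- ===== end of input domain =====

-- B replaces A's per-heading find + min with a single left-to-right scan stopping at the
-- first position where any other heading starts (objective: alternative algorithm, same cost class).

-- ===== PORT A =====
-- 'min(next_positions) if next_positions else len(after)'
def pvMinOrLen (xs : List Int) (len : Nat) : Int :=
  match PySem.List.min? xs (fun x => x) with
  | some m => m
  | none => (len : Int)

def find_section_bounds_py (text : String) (heading : String) (headings : List String) : Option (Int × Int) :=
  let start := PySem.Str.find text heading
  if start = -1 then none
  else
    let after := PySem.List.slice text.toList (some (start + (PySem.Str.len heading : Int))) none
    let next_positions := headings.foldl (fun acc h =>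
      if h = heading then acc
      else
        let idx := PySem.Chars.find after h.toList
        if idx ≠ -1 then acc ++ [idx] else acc) ([] : List Int)
    let endv := start + (PySem.Str.len heading : Int) + pvMinOrLen next_positions after.length
    some (start, endv)

-- ===== PORT B =====
-- the while loop of Source B: advance through `after` until some other heading starts here
def pvScanOff (others : List String) : List Char → Nat
  | [] => 0
  | c :: t =>
    if others.any (fun h => PySem.Chars.startswith (c :: t) h.toList) then 0
    else 1 + pvScanOff others t

def find_section_bounds_py_alt (text : String) (heading : String) (headings : List String) : Option (Int × Int) :=
  let start := PySem.Str.find text heading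
  if start = -1 then none
  else
    let after := PySem.List.slice text.toList (some (start + (PySem.Str.len heading : Int))) none
    let others := headings.filter (fun h => decide (h ≠ heading))
    let off := pvScanOff others after
    some (start, start + (PySem.Str.len heading : Int) + (off : Int))

-- ===== PRECONDITION & SPEC =====
def Spec_find_section_bounds_py (text : String) (heading : String) (headings : List String) (out : Option (Int × Int)) : Prop := out = find_section_bounds_py_alt text heading headings
instance (text : String) (heading : String) (headings : List String) (out : Option (Int × Int)) : Decidable (Spec_find_section_bounds_py text heading headings out) := by unfold Spec_find_section_bounds_py; infer_instance

-- ===== CLAIM (what is proved, stated in full; the proofs are below) =====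
def Claim_equal_find_section_bounds_py : Prop := ∀ (text : String) (heading : String) (headings : List String), Dom_find_section_bounds_py text heading headings → Spec_find_section_bounds_py text heading headings (find_section_bounds_py text heading headings)

-- ===== LEMMAS AND PROOFS =====

-- a prefix of a suffix is an infix
lemma pv_pref_drop_infix {h s : List Char} {i : Nat} (hp : h <+: s.drop i) : h <:+: s :=
  hp.isInfix.trans (s.drop_suffix i).isInfix

-- if no other heading occurs in s at all, the scan runs to the end
lemma pv_scan_no_hit (others : List String) (s : List Char)
    (hno : ∀ h ∈ others, ¬ (h.toList <:+: s)) : pvScanOff others s = s.length := by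
  induction s with
  | nil => rfl
  | cons c t ih =>
    have hany : (others.any (fun h => PySem.Chars.startswith (c :: t) h.toList)) = false := by
      rw [List.any_eq_false]
      intro h hmem
      simp only [PySem.Chars.startswith_iff]
      intro hpre
      exact hno h hmem hpre.isInfix
    have ht : pvScanOff others t = t.length :=
      ih (fun h hmem hin => hno h hmem (hin.trans (t.suffix_cons c).isInfix))
    rw [pvScanOff, hany]
    simp [ht, Nat.add_comm]

-- the scan stops no later than any position where some other heading starts
lemma pv_scan_le (others : List String) (s : List Char) (i : Nat)
    (hhit : ∃ h ∈ others, h.toList <+: s.drop i) : pvScanOff others s ≤ i := by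
  induction s generalizing i with
  | nil => simp [pvScanOff]
  | cons c t ih =>
    by_cases hany : (others.any (fun h => PySem.Chars.startswith (c :: t) h.toList)) = true
    · simp [pvScanOff, hany]
    · rw [pvScanOff, if_neg (by simp [hany])]
      obtain ⟨h, hmem, hpre⟩ := hhit
      cases i with
      | zero =>
        exfalso
        apply hany
        simp only [List.any_eq_true]
        exact ⟨h, hmem, (PySem.Chars.startswith_iff _ _).mpr (by simpa using hpre)⟩
      | succ j =>
        have := ih j ⟨h, hmem, by simpa using hpre⟩
        omega

-- if some other heading occurs in s, one starts exactly where the scan stops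
lemma pv_hit_at_scan (others : List String) (s : List Char)
    (hex : ∃ h ∈ others, h.toList <:+: s) :
    ∃ h ∈ others, h.toList <+: s.drop (pvScanOff others s) := by
  induction s with
  | nil =>
    obtain ⟨h, hmem, hin⟩ := hex
    exact ⟨h, hmem, by rw [List.eq_nil_of_infix_nil hin]; simp⟩
  | cons c t ih =>
    by_cases hany : (others.any (fun h => PySem.Chars.startswith (c :: t) h.toList)) = true
    · have h0 : pvScanOff others (c :: t) = 0 := by
        rw [pvScanOff, if_pos hany]
      simp only [List.any_eq_true] at hany
      obtain ⟨h, hmem, hsw⟩ := hany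
      exact ⟨h, hmem, by rw [h0]; simpa using (PySem.Chars.startswith_iff _ _).mp hsw⟩
    · rw [pvScanOff, if_neg (by simp [hany])]
      have hex' : ∃ h ∈ others, h.toList <:+: t := by
        obtain ⟨h, hmem, hin⟩ := hex
        rcases List.infix_cons_iff.mp hin with hpre | hint
        · exfalso
          apply hany
          simp only [List.any_eq_true]
          exact ⟨h, hmem, (PySem.Chars.startswith_iff _ _).mpr hpre⟩
        · exact ⟨h, hmem, hint⟩
      obtain ⟨h, hmem, hpre⟩ := ih hex'
      exact ⟨h, hmem, by rw [Nat.add_comm, List.drop_succ_cons]; exact hpre⟩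

-- A's accumulation loop, in closed form
lemma pv_loopA (heading : String) (after : List Char) (hs : List String) (acc : List Int) :
    hs.foldl (fun acc h =>
      if h = heading then acc
      else
        let idx := PySem.Chars.find after h.toList
        if idx ≠ -1 then acc ++ [idx] else acc) acc
    = acc ++ ((hs.filter (fun h => !decide (h = heading))).map
        (fun h => PySem.Chars.find after h.toList)).filter (fun i => !decide (i = -1)) := by
  induction hs generalizing acc with
  | nil => simp
  | cons h t ih =>
    rw [List.foldl_cons, ih]
    by_cases hh : h = heading
    · simp [hh]
    · by_cases hidx : PySem.Chars.find after h.toList = -1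
      · simp [hh, hidx]
      · simp [hh, hidx]

-- the core equality: min over found positions (or length) = scan offset
lemma pv_key (after : List Char) (others : List String) :
    pvMinOrLen ((others.map (fun h => PySem.Chars.find after h.toList)).filter
      (fun i => !decide (i = -1))) after.length = (pvScanOff others after : Int) := by
  set P := (others.map (fun h => PySem.Chars.find after h.toList)).filter (fun i => !decide (i = -1)) with hP
  rw [pvMinOrLen]
  cases hmin : PySem.List.min? P (fun x => x) with
  | none =>
    have hPnil : P = [] := (PySem.List.min?_eq_none_iff _ _).mp hmin
    have hno : ∀ h ∈ others, ¬ (h.toList <:+: after) := by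
      intro h hmem hin
      have hne : PySem.Chars.find after h.toList ≠ -1 :=
        (PySem.Chars.find_ne_neg_one_iff _ _).mpr hin
      have : PySem.Chars.find after h.toList ∈ P := by
        rw [hP]
        simp only [List.mem_filter, List.mem_map]
        exact ⟨⟨h, hmem, rfl⟩, by simpa using hne⟩
      rw [hPnil] at this
      simp at this
    show ((after.length : Int)) = (pvScanOff others after : Int)
    rw [pv_scan_no_hit others after hno]
  | some m =>
    have hm : m ∈ P := PySem.List.min?_mem hmin
    rw [hP] at hm
    simp only [List.mem_filter, List.mem_map] at hm
    obtain ⟨⟨h₀, hmem₀, hfind₀⟩, hne₀⟩ := hm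
    have hne₀' : m ≠ -1 := by simpa using hne₀
    have hin₀ : h₀.toList <:+: after := by
      rw [← hfind₀] at hne₀'
      exact (PySem.Chars.find_ne_neg_one_iff _ _).mp hne₀'
    have hm0 : 0 ≤ m := hfind₀ ▸ (PySem.Chars.find_nonneg_iff _ _).mpr hin₀
    have hspec := PySem.Chars.find_spec (sub := h₀.toList) (s := after) (hfind₀ ▸ hm0)
    -- scan ≤ m
    have hle : pvScanOff others after ≤ m.toNat := by
      apply pv_scan_le
      exact ⟨h₀, hmem₀, by rw [← hfind₀]; exact hspec.1⟩
    -- m ≤ scan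
    have hge : m ≤ (pvScanOff others after : Int) := by
      obtain ⟨h, hmem, hpre⟩ := pv_hit_at_scan others after ⟨h₀, hmem₀, hin₀⟩
      have hin : h.toList <:+: after := pv_pref_drop_infix hpre
      have hne : PySem.Chars.find after h.toList ≠ -1 :=
        (PySem.Chars.find_ne_neg_one_iff _ _).mpr hin
      have hmemP : PySem.Chars.find after h.toList ∈ P := by
        rw [hP]
        simp only [List.mem_filter, List.mem_map]
        exact ⟨⟨h, hmem, rfl⟩, by simpa using hne⟩
      have hmin_le := PySem.List.min?_isMin hmin _ hmemP
      have hfnn : 0 ≤ PySem.Chars.find after h.toList :=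
        (PySem.Chars.find_nonneg_iff _ _).mpr hin
      have hfspec := PySem.Chars.find_spec (sub := h.toList) (s := after) hfnn
      have hfle : (PySem.Chars.find after h.toList).toNat ≤ pvScanOff others after := by
        by_contra hlt
        simp only [not_le] at hlt
        exact hfspec.2 _ hlt hpre
      calc m ≤ PySem.Chars.find after h.toList := hmin_le
        _ = ((PySem.Chars.find after h.toList).toNat : Int) := by omega
        _ ≤ (pvScanOff others after : Int) := by exact_mod_cast hfle
    show m = (pvScanOff others after : Int)
    omega

-- ===== VERDICT (by name: the statement is the Claim_ definition above) =====
theorem find_section_bounds_py_spec : Claim_equal_find_section_bounds_py := by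
  intro text heading headings _
  unfold Spec_find_section_bounds_py find_section_bounds_py find_section_bounds_py_alt
  simp only [PySem.Str.find_eq, PySem.Str.len_eq, String.length_toList]
  by_cases hstart : PySem.Chars.find text.toList heading.toList = -1
  · simp [hstart]
  · simp only [if_neg hstart]
    rw [pv_loopA]
    simp only [List.nil_append]
    rw [pv_key]
    simp [decide_not]
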